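-- pv_equiv track=rewrite | github.com/sheestoe/ReactProject | countHighly.py | countHighlyProfitableMonths
-- ===== SOURCE A (Python) =====
-- def countHighlyProfitableMonths(stock_prices, k):
--     count = 0
--     for i,x in enumerate(stock_prices):
--         is_trend = True
--         try:
--             for n in range(1,k):
--                 is_trend = is_trend and stock_prices[i+n-1] < stock_prices[i+n]
--         except IndexError:
--             break
--         if is_trend:
--             count += 1
--     return count
-- ===== SOURCE B (Python) =====
-- def countHighlyProfitableMonths(stock_prices, k):
--     n = len(stock_prices)
--     if k <= 1:
--         # every position counts: the inner check is vacuous for k <= 1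
--         return n
--     count = 0
--     run = 1  # length of the strictly increasing run ending at the current index
--     for j in range(1, n):
--         if stock_prices[j - 1] < stock_prices[j]:
--             run += 1
--         else:
--             run = 1
--         if run >= k:
--             count += 1
--     return count
-- ===== Notes on version B (the rewrite author's own statement) =====
-- stated objective: faster
-- what changed: Replaces the per-start-index rescan of each length-k window (nested loop with try/except-driven break) by a single left-to-right pass that maintains the length of the current strictly increasing run and counts positions where the run reaches k.
import Mathlib
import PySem

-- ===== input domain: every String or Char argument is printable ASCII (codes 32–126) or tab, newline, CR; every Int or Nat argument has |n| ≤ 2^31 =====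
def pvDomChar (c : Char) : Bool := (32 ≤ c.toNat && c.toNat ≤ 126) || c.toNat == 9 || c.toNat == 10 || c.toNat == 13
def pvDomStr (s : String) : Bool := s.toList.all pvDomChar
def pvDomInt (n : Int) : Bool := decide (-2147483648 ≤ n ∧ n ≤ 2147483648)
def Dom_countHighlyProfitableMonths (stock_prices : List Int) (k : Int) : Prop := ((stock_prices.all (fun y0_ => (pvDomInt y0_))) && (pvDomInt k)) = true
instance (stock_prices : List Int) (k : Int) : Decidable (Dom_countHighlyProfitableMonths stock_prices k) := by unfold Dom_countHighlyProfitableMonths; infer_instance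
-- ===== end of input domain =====

-- B replaces A's per-start rescan of each k-window by one pass tracking the current
-- increasing-run length (objective: faster, measured as asymptotic O(n*k) → O(n)).

-- ===== PORT A =====
-- inner loop body: 'is_trend = is_trend and stock_prices[i+n-1] < stock_prices[i+n]'
-- (short-circuit: when is_trend is already False the list is not indexed, so no IndexError);
-- 'none' models the IndexError that the try/except catches.
def pvStepA (sp : List Int) (i : Int) (st : Bool) (m : Int) : Option Bool :=
  if st then
    match PySem.List.pyGet? sp (i + m - 1), PySem.List.pyGet? sp (i + m) with
    | some a, some b => some (decide (a < b))
    | _, _ => none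
  else some false

-- 'for n in range(1, k): …' inside the try
def pvInnerA (sp : List Int) (i k : Int) : Option Bool :=
  (PySem.List.pyRange 1 k 1).foldlM (pvStepA sp i) true

-- outer 'for i, x in enumerate(stock_prices)' with 'break' on IndexError
def pvOuterA (sp : List Int) (k : Int) : List (Int × Int) → Int → Int
  | [], count => count
  | (i, _) :: rest, count =>
    match pvInnerA sp i k with
    | none => count
    | some b => pvOuterA sp k rest (if b then count + 1 else count)

def countHighlyProfitableMonths (stock_prices : List Int) (k : Int) : Int :=
  pvOuterA stock_prices k (PySem.List.enumerate stock_prices 0) 0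

-- ===== PORT B =====
-- loop body of Source B: state (count, run), index j; indices j-1, j are always in range in B's loop
def pvStepB (sp : List Int) (k : Int) (st : Int × Int) (j : Int) : Int × Int :=
  let run := if PySem.List.pyGetD sp (j - 1) 0 < PySem.List.pyGetD sp j 0 then st.2 + 1 else 1
  (if k ≤ run then st.1 + 1 else st.1, run)

def countHighlyProfitableMonths_alt (stock_prices : List Int) (k : Int) : Int :=
  let n : Int := stock_prices.length
  if k ≤ 1 then n
  else ((PySem.List.pyRange 1 n 1).foldl (pvStepB stock_prices k) (0, 1)).1

-- ===== PRECONDITION & SPEC =====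
def Spec_countHighlyProfitableMonths (stock_prices : List Int) (k : Int) (out : Int) : Prop := out = countHighlyProfitableMonths_alt stock_prices k
instance (stock_prices : List Int) (k : Int) (out : Int) : Decidable (Spec_countHighlyProfitableMonths stock_prices k out) := by unfold Spec_countHighlyProfitableMonths; infer_instance

-- ===== CLAIM (what is proved, stated in full; the proofs are below) =====
def Claim_equal_countHighlyProfitableMonths : Prop := ∀ (stock_prices : List Int) (k : Int), Dom_countHighlyProfitableMonths stock_prices k → Spec_countHighlyProfitableMonths stock_prices k (countHighlyProfitableMonths stock_prices k)

-- ===== LEMMAS AND PROOFS =====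

-- the comparison between adjacent positions j-1 and j
def pvCmp (sp : List Int) (m : Int) : Bool :=
  decide (PySem.List.pyGetD sp (m - 1) 0 < PySem.List.pyGetD sp m 0)

-- run length maintained by B, as a recursive function of the position
def pvRun (sp : List Int) : Nat → Int
  | 0 => 1
  | m + 1 => if pvCmp sp ((m : Int) + 1) then pvRun sp m + 1 else 1

-- A's outer loop specialised to the list of indices (it ignores the values)
def pvOuter' (sp : List Int) (k : Int) : List Int → Int → Int
  | [], count => count
  | i :: rest, count =>
    match pvInnerA sp i k with
    | none => count
    | some b => pvOuter' sp k rest (if b then count + 1 else count)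

lemma pvOuterA_eq_outer' (sp : List Int) (k : Int) (l : List (Int × Int)) (c : Int) :
    pvOuterA sp k l c = pvOuter' sp k (l.map (fun x => x.1)) c := by
  induction l generalizing c with
  | nil => rfl
  | cons p rest ih =>
      obtain ⟨i, x⟩ := p
      simp only [pvOuterA, pvOuter', List.map_cons]
      cases pvInnerA sp i k with
      | none => rfl
      | some b => exact ih _

lemma pvFold_false (sp : List Int) (i : Int) (l : List Int) :
    l.foldlM (pvStepA sp i) false = some false := by
  induction l with
  | nil => rfl
  | cons x rest ih => simpa [List.foldlM, pvStepA] using ih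

-- characterisation of A's inner loop from state True
lemma pvFold_char (sp : List Int) (i : Int) (hi : 0 ≤ i) :
    ∀ (t : Nat) (a b : Int), 1 ≤ a → (b - a).toNat = t →
    (PySem.List.pyRange a b 1).foldlM (pvStepA sp i) true =
      (if (PySem.List.pyRange a (min b ((sp.length : Int) - i)) 1).all (fun m => pvCmp sp (i + m)) then
        (if b ≤ max a ((sp.length : Int) - i) then some true else none)
      else some false) := by
  intro t
  induction t with
  | zero =>
      intro a b ha ht
      have hba : b ≤ a := by omega
      rw [PySem.List.pyRange_one_eq_nil hba,
        PySem.List.pyRange_one_eq_nil (le_trans (min_le_left _ _) hba)]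
      simp only [List.all_nil, if_true]
      rw [if_pos (le_trans hba (le_max_left _ _))]
      rfl
  | succ t ih =>
      intro a b ha ht
      have hab : a < b := by omega
      rw [PySem.List.pyRange_one_cons hab, List.foldlM_cons]
      by_cases hL : a < (sp.length : Int) - i
      · have h1 := PySem.List.pyGet?_eq_some_getElem sp (i := i + a - 1) (by omega) (by omega)
        have h2 := PySem.List.pyGet?_eq_some_getElem sp (i := i + a) (by omega) (by omega)
        have hstep : pvStepA sp i true a = some (pvCmp sp (i + a)) := by
          rw [pvStepA, if_pos rfl, h1, h2]
          have e1 := PySem.List.pyGetD_eq_getElem sp (i := i + a - 1) 0 (by omega) (by omega)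
          have e2 := PySem.List.pyGetD_eq_getElem sp (i := i + a) 0 (by omega) (by omega)
          simp [pvCmp, e1, e2]
        rw [hstep]
        simp only [Option.bind_eq_bind, Option.bind_some]
        have hcons : PySem.List.pyRange a (min b ((sp.length : Int) - i)) 1
            = a :: PySem.List.pyRange (a + 1) (min b ((sp.length : Int) - i)) 1 :=
          PySem.List.pyRange_one_cons (by omega)
        by_cases hc : pvCmp sp (i + a) = true
        · rw [hc, ih (a + 1) b (by omega) (by omega), hcons]
          simp only [List.all_cons, hc, Bool.true_and]
          have hmax : max (a + 1) ((sp.length : Int) - i) = max a ((sp.length : Int) - i) := by omega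
          have hmin : min b ((sp.length : Int) - i) = min b ((sp.length : Int) - i) := rfl
          rw [hmax]
        · rw [Bool.not_eq_true] at hc
          rw [hc, pvFold_false, hcons]
          simp only [List.all_cons, hc, Bool.false_and, if_neg (Bool.false_ne_true)]
      · have h2 : PySem.List.pyGet? sp (i + a) = none := by
          rw [PySem.List.pyGet?_eq_none_iff]
          intro hin
          rw [PySem.Raise.InRange] at hin
          omega
        have hstep : pvStepA sp i true a = none := by
          rw [pvStepA, if_pos rfl, h2]
          cases PySem.List.pyGet? sp (i + a - 1) <;> rfl
        rw [hstep]
        simp only [Option.bind_eq_bind, Option.bind_none]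
        have hnil : PySem.List.pyRange a (min b ((sp.length : Int) - i)) 1 = [] :=
          PySem.List.pyRange_one_eq_nil (by omega)
        rw [hnil]
        simp only [List.all_nil, if_true]
        rw [if_neg (by omega)]

lemma pvInnerA_char (sp : List Int) (k i : Int) (_hk : 2 ≤ k) (hi : 0 ≤ i) (hin : i < (sp.length : Int)) :
    pvInnerA sp i k =
      (if (PySem.List.pyRange 1 (min k ((sp.length : Int) - i)) 1).all (fun m => pvCmp sp (i + m)) then
        (if k ≤ (sp.length : Int) - i then some true else none)
      else some false) := by
  have h := pvFold_char sp i hi (k - 1).toNat 1 k le_rfl (by omega)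
  rw [pvInnerA, h]
  have hmax : max 1 ((sp.length : Int) - i) = (sp.length : Int) - i := by omega
  rw [hmax]

lemma pvOuter'_count (sp : List Int) (k : Int) :
    ∀ (l : List Int) (c : Int), l.Pairwise (· < ·) →
    (∀ x y, x ∈ l → y ∈ l → x < y → pvInnerA sp x k = none → pvInnerA sp y k ≠ some true) →
    pvOuter' sp k l c = c + (l.countP (fun i => pvInnerA sp i k == some true) : Int) := by
  intro l
  induction l with
  | nil => intro c _ _; simp [pvOuter']
  | cons x rest ih =>
      intro c hpw hmono
      rw [List.pairwise_cons] at hpw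
      simp only [pvOuter']
      cases h : pvInnerA sp x k with
      | none =>
          have hz : (x :: rest).countP (fun i => pvInnerA sp i k == some true) = 0 := by
            rw [List.countP_eq_zero]
            intro a hamem
            rcases List.mem_cons.mp hamem with rfl | hmem
            · simp [h]
            · have hne := hmono x a (List.mem_cons_self) (List.mem_cons_of_mem _ hmem)
                (hpw.1 a hmem) h
              simp only [beq_iff_eq]
              exact fun hh => hne hh
          rw [hz]
          simp
      | some b =>
          change pvOuter' sp k rest (if b = true then c + 1 else c) = _
          rw [ih _ hpw.2
            (fun x' y' hx hy hlt hn => hmono x' y' (List.mem_cons_of_mem _ hx) (List.mem_cons_of_mem _ hy) hlt hn)]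
          rw [List.countP_cons]
          simp only [h]
          cases b <;> simp <;> push_cast <;> ring

-- A-side predicate: window of length k starting at i is in range and increasing
def pvWA (sp : List Int) (k : Int) (i : Int) : Bool :=
  decide (i + k ≤ (sp.length : Int)) && (PySem.List.pyRange 1 k 1).all (fun m => pvCmp sp (i + m))

lemma pvInner_eq_WA (sp : List Int) (k i : Int) (hk : 2 ≤ k) (hi : 0 ≤ i) (hin : i < (sp.length : Int)) :
    (pvInnerA sp i k == some true) = pvWA sp k i := by
  rw [pvInnerA_char sp k i hk hi hin]
  by_cases hkL : k ≤ (sp.length : Int) - i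
  · have hmin : min k ((sp.length : Int) - i) = k := min_eq_left hkL
    rw [hmin, if_pos hkL]
    by_cases hall : (PySem.List.pyRange 1 k 1).all (fun m => pvCmp sp (i + m)) = true
    · simp [pvWA, hall, show (i : Int) + k ≤ (sp.length : Int) by omega]
    · rw [Bool.not_eq_true] at hall
      simp [pvWA, hall]
  · rw [if_neg hkL]
    have hnot : ¬ ((i : Int) + k ≤ (sp.length : Int)) := by omega
    by_cases hall : (PySem.List.pyRange 1 (min k ((sp.length : Int) - i)) 1).all (fun m => pvCmp sp (i + m)) = true
    · simp [pvWA, hall, hnot]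
    · rw [Bool.not_eq_true] at hall
      simp [pvWA, hall, hnot]

lemma pvRun_pos (sp : List Int) (j : Nat) : 1 ≤ pvRun sp j := by
  cases j with
  | zero => simp [pvRun]
  | succ m => simp only [pvRun]; split <;> [have := pvRun_pos sp m; skip] <;> omega

-- characterisation of the run length
lemma pvRun_le (sp : List Int) (j : Nat) : pvRun sp j ≤ (j : Int) + 1 := by
  induction j with
  | zero => simp [pvRun]
  | succ m ih =>
      simp only [pvRun]
      split <;> push_cast <;> omega

lemma pvRun_char (sp : List Int) : ∀ (j : Nat) (r : Int), 1 ≤ r →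
    (r ≤ pvRun sp j ↔ r ≤ (j : Int) + 1 ∧
      (PySem.List.pyRange ((j : Int) - r + 2) ((j : Int) + 1) 1).all (fun m => pvCmp sp m) = true) := by
  intro j
  induction j with
  | zero =>
      intro r hr
      simp only [pvRun, Nat.cast_zero]
      constructor
      · intro h
        have hr1 : r = 1 := by omega
        subst hr1
        rw [PySem.List.pyRange_one_eq_nil (by omega)]
        simp
      · rintro ⟨h, -⟩; exact h
  | succ m ih =>
      intro r hr
      simp only [pvRun]
      by_cases hc : pvCmp sp ((m : Int) + 1) = true
      · rw [if_pos hc]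
        by_cases hr1 : r = 1
        · subst hr1
          have h1 : (1 : Int) ≤ pvRun sp m + 1 := by have := pvRun_pos sp m; omega
          have h2 : ((m + 1 : Nat) : Int) - 1 + 2 = ((m + 1 : Nat) : Int) + 1 := by push_cast; ring
          rw [h2, PySem.List.pyRange_one_eq_nil le_rfl]
          simp only [List.all_nil]
          constructor
          · intro _; exact ⟨by push_cast; omega, by simp⟩
          · intro _; exact h1
        · have hr2 : 2 ≤ r := by omega
          have hiff := ih (r - 1) (by omega)
          have hsplit : PySem.List.pyRange (((m + 1 : Nat) : Int) - r + 2) (((m + 1 : Nat) : Int) + 1) 1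
              = PySem.List.pyRange ((m : Int) - (r - 1) + 2) ((m : Int) + 1) 1 ++ [(m : Int) + 1] := by
            have he : ((m + 1 : Nat) : Int) - r + 2 = (m : Int) - (r - 1) + 2 := by push_cast; ring
            have he2 : ((m + 1 : Nat) : Int) + 1 = ((m : Int) + 1) + 1 := by push_cast; ring
            rw [he, he2, PySem.List.pyRange_one_succ_right (by omega)]
          rw [hsplit, List.all_append]
          simp only [List.all_cons, List.all_nil, hc, Bool.and_true]
          constructor
          · intro h
            obtain ⟨ha, hb⟩ := hiff.mp (by omega)
            exact ⟨by push_cast at ha ⊢; omega, hb⟩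
          · rintro ⟨h1, h2⟩
            have h3 := hiff.mpr ⟨by push_cast at h1 ⊢; omega, h2⟩
            omega
      · rw [if_neg hc]
        by_cases hr1 : r = 1
        · subst hr1
          have h2 : ((m + 1 : Nat) : Int) - 1 + 2 = ((m + 1 : Nat) : Int) + 1 := by push_cast; ring
          rw [h2, PySem.List.pyRange_one_eq_nil le_rfl]
          simp only [List.all_nil]
          constructor
          · intro _; exact ⟨by push_cast; omega, by simp⟩
          · intro _; omega
        · have hr2 : 2 ≤ r := by omega
          constructor
          · intro h; omega
          · intro ⟨h1, h2⟩
            exfalso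
            have hmem : ((m : Int) + 1) ∈ PySem.List.pyRange (((m + 1 : Nat) : Int) - r + 2) (((m + 1 : Nat) : Int) + 1) 1 := by
              rw [PySem.List.mem_pyRange_one]
              push_cast
              omega
            have := List.all_eq_true.mp h2 _ hmem
            simp only at this
            exact hc this

-- B's loop invariant
-- B's loop invariant (the loop over range(1, n) truncated after m steps)
lemma pvFoldB_inv (sp : List Int) (k : Int) :
    ∀ (m : Nat),
    (PySem.List.pyRange 1 ((m : Int) + 1) 1).foldl (pvStepB sp k) (0, 1) =
      (((PySem.List.pyRange 1 ((m : Int) + 1) 1).countP (fun j' => decide (k ≤ pvRun sp j'.toNat)) : Int),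
        pvRun sp m) := by
  intro m
  induction m with
  | zero =>
      rw [PySem.List.pyRange_one_eq_nil (by norm_num)]
      simp [pvRun]
  | succ m ih =>
      have hsplit : PySem.List.pyRange 1 (((m + 1 : Nat) : Int) + 1) 1
          = PySem.List.pyRange 1 ((m : Int) + 1) 1 ++ [(m : Int) + 1] := by
        have he : ((m + 1 : Nat) : Int) + 1 = ((m : Int) + 1) + 1 := by push_cast; ring
        rw [he, PySem.List.pyRange_one_succ_right (by omega)]
      rw [hsplit, List.foldl_append, ih, List.countP_append]
      simp only [List.foldl_cons, List.foldl_nil, List.countP_cons, List.countP_nil]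
      have htn : ((m : Int) + 1).toNat = m + 1 := by omega
      have hrun : (if PySem.List.pyGetD sp ((m : Int) + 1 - 1) 0 < PySem.List.pyGetD sp ((m : Int) + 1) 0
          then pvRun sp m + 1 else 1) = pvRun sp (m + 1) := by
        simp only [pvRun, pvCmp]
        by_cases h : PySem.List.pyGetD sp ((m : Int) + 1 - 1) 0 < PySem.List.pyGetD sp ((m : Int) + 1) 0 <;>
          simp [h]
      simp only [pvStepB, hrun, htn]
      by_cases h : k ≤ pvRun sp (m + 1) <;> simp [h]

-- counting bijection over List.range
lemma pvShiftCount (p q : Nat → Bool) (t N : Nat)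
    (hpq : ∀ i, i + t < N → p i = q (i + t))
    (hp0 : ∀ i, N ≤ i + t → p i = false)
    (hq0 : ∀ j, j < t → q j = false) :
    (List.range N).countP p = (List.range N).countP q := by
  by_cases h : t ≤ N
  · have hN1 : N = (N - t) + t := by omega
    have hN2 : N = t + (N - t) := by omega
    have hP : (List.range N).countP p = (List.range (N - t)).countP p := by
      conv_lhs => rw [hN1, List.range_add]
      rw [List.countP_append, List.countP_map]
      have : (List.range t).countP ((fun i => p ((N - t) + i))) = 0 := by
        rw [List.countP_eq_zero]
        intro a _
        simp [hp0 ((N - t) + a) (by omega)]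
      simp only [Function.comp_def] at *
      omega
    have hQ : (List.range N).countP q = (List.range (N - t)).countP (fun i => q (t + i)) := by
      conv_lhs => rw [hN2, List.range_add]
      rw [List.countP_append, List.countP_map]
      have : (List.range t).countP q = 0 := by
        rw [List.countP_eq_zero]
        intro a ha
        simp only [List.mem_range] at ha
        simp [hq0 a ha]
      simp only [Function.comp_def] at *
      omega
    rw [hP, hQ]
    apply List.countP_congr
    intro i hi
    simp only [List.mem_range] at hi
    rw [hpq i (by omega), Nat.add_comm]
  · have h' : N < t := by omega
    have hP : (List.range N).countP p = 0 := by
      rw [List.countP_eq_zero]; intro a _; simp [hp0 a (by omega)]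
    have hQ : (List.range N).countP q = 0 := by
      rw [List.countP_eq_zero]; intro a ha
      simp only [List.mem_range] at ha
      simp [hq0 a (by omega)]
    rw [hP, hQ]

-- ===== VERDICT (by name: the statement is the Claim_ definition above) =====
-- A's inner loop returns none only when the window overruns the end of the list
lemma pvInner_none_imp (sp : List Int) (k x : Int) (hk2 : 2 ≤ k) (hx0 : 0 ≤ x)
    (hxn : x < (sp.length : Int)) (hnone : pvInnerA sp x k = none) :
    ¬ (k ≤ (sp.length : Int) - x) := by
  intro hcon
  rw [pvInnerA_char sp k x hk2 hx0 hxn] at hnone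
  split_ifs at hnone <;> simp_all

lemma pvInner_not_true (sp : List Int) (k y : Int) (hk2 : 2 ≤ k) (hy0 : 0 ≤ y)
    (hyn : y < (sp.length : Int)) (hky : ¬ (k ≤ (sp.length : Int) - y)) :
    pvInnerA sp y k ≠ some true := by
  intro heq
  rw [pvInnerA_char sp k y hk2 hy0 hyn] at heq
  split_ifs at heq <;> simp_all

-- index shift under an 'all' over a range
lemma pvAll_shift (c : Int → Bool) (i a b : Int) :
    (PySem.List.pyRange a b 1).all (fun m => c (i + m)) = (PySem.List.pyRange (i + a) (i + b) 1).all (fun m => c m) := by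
  rw [PySem.List.pyRange_one a b, PySem.List.pyRange_one (i + a) (i + b)]
  have he : i + b - (i + a) = b - a := by ring
  rw [he, List.all_map, List.all_map]
  simp only [Function.comp_def]
  congr 1
  funext t
  congr 1
  ring

theorem countHighlyProfitableMonths_spec : Claim_equal_countHighlyProfitableMonths := by
  intro sp k _
  unfold Spec_countHighlyProfitableMonths
  have hA : countHighlyProfitableMonths sp k
      = pvOuter' sp k (PySem.List.pyRange 0 (sp.length : Int) 1) 0 := by
    rw [countHighlyProfitableMonths, pvOuterA_eq_outer', PySem.List.map_fst_enumerate, zero_add]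
  rw [hA]
  by_cases hk : k ≤ 1
  · -- range(1, k) is empty: A counts every index; B returns len directly
    have hR : countHighlyProfitableMonths_alt sp k = (sp.length : Int) := by
      simp [countHighlyProfitableMonths_alt, hk]
    rw [hR]
    have hinner : ∀ i : Int, pvInnerA sp i k = some true := by
      intro i
      rw [pvInnerA, PySem.List.pyRange_one_eq_nil (by omega)]
      rfl
    rw [pvOuter'_count sp k _ 0 (PySem.List.pairwise_lt_pyRange_one 0 _)
      (fun x y _ _ _ hnone => by rw [hinner x] at hnone; cases hnone)]
    rw [List.countP_eq_length.mpr (fun a _ => by simp [hinner a]), PySem.List.length_pyRange_one]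
    omega
  · have hk2 : 2 ≤ k := by omega
    have hR : countHighlyProfitableMonths_alt sp k
        = ((PySem.List.pyRange 1 (sp.length : Int) 1).foldl (pvStepB sp k) (0, 1)).1 := by
      simp [countHighlyProfitableMonths_alt, hk]
    rw [hR]
    by_cases hlen : sp.length = 0
    · rw [PySem.List.pyRange_one_eq_nil (by omega), PySem.List.pyRange_one_eq_nil (by omega)]
      simp [pvOuter']
    · -- A: break-free characterisation of the outer loop
      have hmono : ∀ x y, x ∈ PySem.List.pyRange 0 (sp.length : Int) 1 →
          y ∈ PySem.List.pyRange 0 (sp.length : Int) 1 → x < y →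
          pvInnerA sp x k = none → pvInnerA sp y k ≠ some true := by
        intro x y hx hy hxy hnone
        rw [PySem.List.mem_pyRange_one] at hx hy
        have hkx := pvInner_none_imp sp k x hk2 hx.1 hx.2 hnone
        exact pvInner_not_true sp k y hk2 hy.1 hy.2 (by omega)
      rw [pvOuter'_count sp k _ 0 (PySem.List.pairwise_lt_pyRange_one 0 _) hmono]
      have hWA : List.countP (fun i => pvInnerA sp i k == some true)
            (PySem.List.pyRange 0 (sp.length : Int) 1)
          = List.countP (fun i => pvWA sp k i) (PySem.List.pyRange 0 (sp.length : Int) 1) :=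
        List.countP_congr (fun x hx => by
          rw [PySem.List.mem_pyRange_one] at hx
          rw [pvInner_eq_WA sp k x hk2 hx.1 hx.2])
      rw [hWA]
      -- B: loop invariant at the last index
      have hcast : ((sp.length - 1 : Nat) : Int) + 1 = (sp.length : Int) := by omega
      have hB := pvFoldB_inv sp k (sp.length - 1)
      rw [hcast] at hB
      rw [hB]
      -- prepend the (never-satisfied) index 0 to B's count
      have hQ0 : List.countP (fun j' => decide (k ≤ pvRun sp j'.toNat))
            (PySem.List.pyRange 1 (sp.length : Int) 1)
          = List.countP (fun j' => decide (k ≤ pvRun sp j'.toNat))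
            (PySem.List.pyRange 0 (sp.length : Int) 1) := by
        rw [PySem.List.pyRange_one_cons (by omega : (0 : Int) < (sp.length : Int)), List.countP_cons]
        simp [pvRun, hk]
      -- the two counts over range(len) coincide (index shift by k-1)
      have hkt : (k.toNat : Int) = k := Int.toNat_of_nonneg (by omega)
      have hmain : List.countP (fun i => pvWA sp k i) (PySem.List.pyRange 0 (sp.length : Int) 1)
          = List.countP (fun j' => decide (k ≤ pvRun sp j'.toNat))
            (PySem.List.pyRange 0 (sp.length : Int) 1) := by
        rw [PySem.List.pyRange_one 0 (sp.length : Int)]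
        have hnn : ((sp.length : Int) - 0).toNat = sp.length := by omega
        rw [hnn, List.countP_map, List.countP_map]
        simp only [Function.comp_def, zero_add, Int.toNat_natCast]
        apply pvShiftCount _ _ (k.toNat - 1) sp.length
        · -- p i = q (i + (k-1)) inside the list
          intro i hi
          show pvWA sp k (i : Int) = decide (k ≤ pvRun sp (i + (k.toNat - 1)))
          have hrc := pvRun_char sp (i + (k.toNat - 1)) k (by omega)
          have hall_eq : (PySem.List.pyRange 1 k 1).all (fun m => pvCmp sp ((i : Int) + m))
              = (PySem.List.pyRange (((i + (k.toNat - 1) : Nat) : Int) - k + 2)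
                  (((i + (k.toNat - 1) : Nat) : Int) + 1) 1).all (fun m => pvCmp sp m) := by
            rw [pvAll_shift (pvCmp sp) (i : Int) 1 k]
            have e1 : ((i + (k.toNat - 1) : Nat) : Int) - k + 2 = (i : Int) + 1 := by omega
            have e2 : ((i + (k.toNat - 1) : Nat) : Int) + 1 = (i : Int) + k := by omega
            rw [e1, e2]
          by_cases hrun : k ≤ pvRun sp (i + (k.toNat - 1))
          · obtain ⟨h1, h2⟩ := hrc.mp hrun
            have hwa : pvWA sp k (i : Int) = true := by
              rw [pvWA, hall_eq, h2, Bool.and_true]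
              exact decide_eq_true (by omega)
            rw [hwa, decide_eq_true hrun]
          · have h2 : (PySem.List.pyRange (((i + (k.toNat - 1) : Nat) : Int) - k + 2)
                (((i + (k.toNat - 1) : Nat) : Int) + 1) 1).all (fun m => pvCmp sp m) = false := by
              rw [Bool.eq_false_iff]
              intro hcon
              exact hrun (hrc.mpr ⟨by omega, hcon⟩)
            have hwa : pvWA sp k (i : Int) = false := by
              rw [pvWA, hall_eq, h2, Bool.and_false]
            rw [hwa, decide_eq_false hrun]
        · -- the window overruns the list: pvWA is false
          intro i hi
          simp [pvWA, show ¬ ((i : Int) + k ≤ (sp.length : Int)) by omega]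
        · -- a run of length ≥ k cannot end before index k-1
          intro j hj
          have hle := pvRun_le sp j
          simp only [decide_eq_false_iff_not]
          omega
      rw [hmain, hQ0]
      omega
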